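-- pv_equiv track=rewrite | github.com/Jordi6/sidekick-alg | fran_sidekick.py | get_largest_substring
-- ===== SOURCE A (Python) =====
-- def get_largest_substring(one, two):
--     num = 0
--     substring = ""
--
--     for i in range(len(one)):
--         for j in range(len(two)):
--             # check to see if we found a common sub string.
--             # and save the largest one we find.
--             if one[i] == two[j] and len(one[i]) > num:
--                 num = len(one[i])
--                 substring = one[i]
--
--     return num, substring
-- ===== SOURCE B (Python) =====
-- def get_largest_substring(one, two):
--     # Sort-then-scan: stable sort by length descending, then take the first
--     # element also present in `two` (list membership keeps `==` semantics).
--     for x in sorted(one, key=len, reverse=True):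
--         if x in two:
--             return len(x), x
--     return 0, ""
-- ===== Notes on version B (the rewrite author's own statement) =====
-- stated objective: faster
-- what changed: Replaced the nested scans with a running (num, substring) maximum by sort-then-scan: stable-sort `one` by length descending and return at the first element found in `two` (stability makes ties resolve to the smallest original index, exactly A's strict-> update).
import Mathlib
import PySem

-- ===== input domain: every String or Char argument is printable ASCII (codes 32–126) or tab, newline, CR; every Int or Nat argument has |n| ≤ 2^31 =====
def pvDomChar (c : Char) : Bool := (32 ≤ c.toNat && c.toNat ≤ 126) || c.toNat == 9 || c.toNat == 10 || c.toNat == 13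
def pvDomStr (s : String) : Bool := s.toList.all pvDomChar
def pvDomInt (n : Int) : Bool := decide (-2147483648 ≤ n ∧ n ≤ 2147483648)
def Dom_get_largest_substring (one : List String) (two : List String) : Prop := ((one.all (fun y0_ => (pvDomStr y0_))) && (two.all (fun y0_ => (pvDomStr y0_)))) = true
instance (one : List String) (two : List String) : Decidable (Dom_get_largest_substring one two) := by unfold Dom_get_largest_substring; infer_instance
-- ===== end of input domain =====

-- B replaces A's nested scans with a running maximum by sort-then-scan: stable-sort
-- `one` by length descending and return the first element present in `two`.

-- ===== PORT A =====
-- literal port of A: nested index loops over range(len(one)) / range(len(two)),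
-- running state (num, substring) updated when one[i] == two[j] and len(one[i]) > num
def get_largest_substring (one : List String) (two : List String) : Int × String :=
  (PySem.List.pyRange 0 (PySem.List.len one) 1).foldl (fun st i =>
    (PySem.List.pyRange 0 (PySem.List.len two) 1).foldl (fun st j =>
      if PySem.List.pyGetD one i "" = PySem.List.pyGetD two j ""
          ∧ PySem.Str.len (PySem.List.pyGetD one i "") > st.1 then
        (PySem.Str.len (PySem.List.pyGetD one i ""), PySem.List.pyGetD one i "")
      else st) st) (0, "")

-- ===== PORT B =====
-- literal port of B: scan sorted(one, key=len, reverse=True) and return at the first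
-- element x with x in two (the for-loop with early return is List.find?); else (0, "")
def get_largest_substring_alt (one : List String) (two : List String) : Int × String :=
  match (PySem.List.sorted one (fun x => PySem.Str.len x) true).find?
      (fun x => two.contains x) with
  | some x => (PySem.Str.len x, x)
  | none => (0, "")

-- ===== PRECONDITION & SPEC =====
def Spec_get_largest_substring (one : List String) (two : List String) (out : Int × String) : Prop := out = get_largest_substring_alt one two
instance (one : List String) (two : List String) (out : Int × String) : Decidable (Spec_get_largest_substring one two out) := by unfold Spec_get_largest_substring; infer_instance

-- ===== CLAIM (what is proved, stated in full; the proofs are below) =====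
def Claim_equal_get_largest_substring : Prop := ∀ (one : List String) (two : List String), Dom_get_largest_substring one two → Spec_get_largest_substring one two (get_largest_substring one two)

-- ===== LEMMAS AND PROOFS =====

-- the first length-maximal element of s :: l (running max with strict <, keeping the first)
def pvBest (s : String) (l : List String) : String :=
  l.foldl (fun m x => if PySem.Str.len m < PySem.Str.len x then x else m) s

-- the comparison the reverse sort inserts with
def pvBef (a b : String) : Bool := decide (PySem.Str.len b < PySem.Str.len a)

theorem insertBy_nil (x : String) :
    PySem.List.insertBy pvBef x [] = [x] := rfl

theorem insertBy_cons (x y : String) (ys : List String) :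
    PySem.List.insertBy pvBef x (y :: ys)
    = if pvBef x y then x :: y :: ys else y :: PySem.List.insertBy pvBef x ys := rfl

-- insertBy preserves the length-nonincreasing invariant of the accumulator
theorem pairwise_insertBy (x : String) (acc : List String)
    (h : acc.Pairwise (fun a b => PySem.Str.len b ≤ PySem.Str.len a)) :
    (PySem.List.insertBy pvBef x acc).Pairwise (fun a b => PySem.Str.len b ≤ PySem.Str.len a) := by
  induction acc with
  | nil => simp [insertBy_nil]
  | cons y ys ih =>
    rw [insertBy_cons]
    rcases List.pairwise_cons.mp h with ⟨hy, hys⟩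
    by_cases hb : pvBef x y = true
    · have hlt : PySem.Str.len y < PySem.Str.len x := by
        simpa [pvBef] using hb
      rw [if_pos hb]
      refine List.pairwise_cons.mpr ⟨?_, h⟩
      intro z hz
      rcases List.mem_cons.mp hz with h1 | h1
      · subst h1; omega
      · have := hy z h1; omega
    · have hle : PySem.Str.len x ≤ PySem.Str.len y := by
        have : ¬ PySem.Str.len y < PySem.Str.len x := by simpa [pvBef] using hb
        omega
      rw [if_neg hb]
      refine List.pairwise_cons.mpr ⟨?_, ih hys⟩
      intro z hz
      rcases (PySem.List.mem_insertBy pvBef x z ys).mp hz with h1 | h1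
      · subst h1; exact hle
      · exact hy z h1
-- filter commutes with insertBy into a length-nonincreasing accumulator
theorem filter_insertBy (p : String → Bool) (x : String) (acc : List String)
    (h : acc.Pairwise (fun a b => PySem.Str.len b ≤ PySem.Str.len a)) :
    (PySem.List.insertBy pvBef x acc).filter p
    = if p x then PySem.List.insertBy pvBef x (acc.filter p) else acc.filter p := by
  induction acc with
  | nil =>
    rw [insertBy_nil]
    by_cases hp : p x
    · simp [List.filter, hp, insertBy_nil]
    · simp [List.filter, hp]
  | cons y ys ih =>
    rcases List.pairwise_cons.mp h with ⟨hy, hys⟩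
    rw [insertBy_cons]
    by_cases hb : pvBef x y = true
    · have hlt : PySem.Str.len y < PySem.Str.len x := by simpa [pvBef] using hb
      rw [if_pos hb]
      by_cases hp : p x
      · rw [if_pos hp]
        by_cases hpy : p y
        · simp only [List.filter_cons, hp, hpy, if_pos]
          rw [insertBy_cons, if_pos hb]
        · simp only [List.filter_cons, hp, hpy]
          simp only [if_pos, Bool.false_eq_true, if_neg, not_false_iff]
          cases hfy : ys.filter p with
          | nil => rw [insertBy_nil]
          | cons z l =>
            have hz : z ∈ ys := by
              have : z ∈ ys.filter p := by rw [hfy]; exact List.mem_cons_self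
              exact List.mem_of_mem_filter this
            have hzb : pvBef x z = true := by
              have := hy z hz
              simp only [pvBef, decide_eq_true_eq]
              omega
            rw [insertBy_cons, if_pos hzb]
      · rw [if_neg hp]
        simp [List.filter_cons, hp]
    · rw [if_neg hb]
      by_cases hp : p x
      · rw [if_pos hp]
        by_cases hpy : p y
        · simp only [List.filter_cons, hpy, if_pos]
          rw [insertBy_cons, if_neg hb]
          simp only [List.cons.injEq, true_and]
          have := ih hys
          rw [if_pos hp] at this
          exact this
        · simp only [List.filter_cons, hpy, Bool.false_eq_true, if_neg, not_false_iff]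
          have := ih hys
          rw [if_pos hp] at this
          exact this
      · rw [if_neg hp]
        by_cases hpy : p y
        · simp only [List.filter_cons, hpy, if_pos]
          have := ih hys
          rw [if_neg hp] at this
          rw [this]
        · simp only [List.filter_cons, hpy, Bool.false_eq_true, if_neg, not_false_iff]
          have := ih hys
          rw [if_neg hp] at this
          exact this

-- filter commutes with the whole insertion fold
theorem filter_foldl_ins (p : String → Bool) (xs : List String) (acc : List String)
    (h : acc.Pairwise (fun a b => PySem.Str.len b ≤ PySem.Str.len a)) :
    (xs.foldl (fun acc x => PySem.List.insertBy pvBef x acc) acc).filter p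
    = (xs.filter p).foldl (fun acc x => PySem.List.insertBy pvBef x acc) (acc.filter p) := by
  induction xs generalizing acc with
  | nil => simp
  | cons x xs ih =>
    rw [List.foldl_cons, ih (PySem.List.insertBy pvBef x acc) (pairwise_insertBy x acc h),
        filter_insertBy p x acc h, List.filter_cons]
    by_cases hp : p x
    · rw [if_pos hp]; simp [hp]
    · rw [if_neg hp]; simp [hp]

-- STABILITY: filtering a (stable) reverse length-sort = sorting the filtered list
theorem filter_sorted_rev (p : String → Bool) (xs : List String) :
    (PySem.List.sorted xs (fun x => PySem.Str.len x) true).filter p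
    = PySem.List.sorted (xs.filter p) (fun x => PySem.Str.len x) true := by
  rw [PySem.List.sorted_rev_eq_foldl_insertBy xs (fun x => PySem.Str.len x),
      PySem.List.sorted_rev_eq_foldl_insertBy (xs.filter p) (fun x => PySem.Str.len x)]
  exact filter_foldl_ins p xs [] List.Pairwise.nil

-- the head of the insertion fold is the running strict maximum (first maximal element)
theorem head_foldl_ins (t : List String) (h : String) (rest : List String) :
    (t.foldl (fun acc x => PySem.List.insertBy pvBef x acc) (h :: rest)).head?
    = some (pvBest h t) := by
  induction t generalizing h rest with
  | nil => rfl
  | cons z t' ih =>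
    rw [List.foldl_cons, insertBy_cons]
    by_cases hb : pvBef z h = true
    · have hlt : PySem.Str.len h < PySem.Str.len z := by simpa [pvBef] using hb
      rw [if_pos hb, ih z (h :: rest)]
      simp only [pvBest, List.foldl_cons]
      rw [if_pos hlt]
    · have hnlt : ¬ PySem.Str.len h < PySem.Str.len z := by simpa [pvBef] using hb
      rw [if_neg hb, ih h (PySem.List.insertBy pvBef z rest)]
      simp only [pvBest, List.foldl_cons]
      rw [if_neg hnlt]

-- the head of the reverse length-sort of a nonempty list is its first maximal element
theorem head_sorted_rev_cons (x : String) (t : List String) :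
    (PySem.List.sorted (x :: t) (fun y => PySem.Str.len y) true).head? = some (pvBest x t) := by
  rw [PySem.List.sorted_rev_eq_foldl_insertBy (x :: t) (fun y => PySem.Str.len y),
      List.foldl_cons]
  have : PySem.List.insertBy (fun a b => decide (PySem.Str.len b < PySem.Str.len a)) x
      ([] : List String) = [x] := rfl
  rw [this]
  exact head_foldl_ins t x []

-- find? is the head of the filter
theorem find?_eq_head?_filter (p : String → Bool) (l : List String) :
    l.find? p = (l.filter p).head? := by
  induction l with
  | nil => rfl
  | cons a l ih =>
    by_cases hp : p a
    · rw [List.find?_cons_of_pos (h := hp), List.filter_cons, if_pos hp]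
      rfl
    · rw [List.find?_cons_of_neg (h := hp), List.filter_cons, if_neg hp, ih]

-- A's inner loop over `two` is exactly "if x in two and len(x) > num: update"
theorem inner_loop_eq (two : List String) (x : String) (st : Int × String) :
    two.foldl (fun st y =>
      if x = y ∧ PySem.Str.len x > st.1 then (PySem.Str.len x, x) else st) st
    = if x ∈ two ∧ PySem.Str.len x > st.1 then (PySem.Str.len x, x) else st := by
  induction two generalizing st with
  | nil => simp
  | cons y t ih =>
    rw [List.foldl_cons]
    by_cases hxy : x = y
    · subst hxy
      by_cases hlt : PySem.Str.len x > st.1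
      · rw [if_pos ⟨rfl, hlt⟩, ih]
        rw [if_neg (by rintro ⟨-, h⟩; exact lt_irrefl _ h),
            if_pos ⟨List.mem_cons_self, hlt⟩]
      · rw [if_neg (by rintro ⟨-, h⟩; exact hlt h), ih]
        rw [if_neg (by rintro ⟨-, h⟩; exact hlt h),
            if_neg (by rintro ⟨-, h⟩; exact hlt h)]
    · rw [if_neg (by rintro ⟨h, -⟩; exact hxy h), ih]
      by_cases hmem : x ∈ t
      · have he : (x ∈ t ∧ PySem.Str.len x > st.1) ↔ ((x ∈ y :: t) ∧ PySem.Str.len x > st.1) := by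
          simp [List.mem_cons, hmem]
        rw [if_congr he rfl rfl]
      · rw [if_neg (by rintro ⟨h, -⟩; exact hmem h),
            if_neg (by rintro ⟨h, -⟩; rcases List.mem_cons.mp h with h | h; exact hxy h; exact hmem h)]

-- the seeded running (num, substring) fold computes pvBest
theorem fold_seeded_eq_pvBest (l : List String) (s : String) :
    l.foldl (fun st x =>
      if PySem.Str.len x > st.1 then (PySem.Str.len x, x) else st) (PySem.Str.len s, s)
    = (PySem.Str.len (pvBest s l), pvBest s l) := by
  induction l generalizing s with
  | nil => rfl
  | cons x t ih =>
    rw [pvBest, List.foldl_cons, List.foldl_cons]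
    by_cases h : PySem.Str.len s < PySem.Str.len x
    · rw [if_pos (show PySem.Str.len x > (PySem.Str.len s, s).1 from h), if_pos h]
      exact ih x
    · rw [if_neg (show ¬ PySem.Str.len x > (PySem.Str.len s, s).1 from h), if_neg h]
      exact ih s

theorem str_len_zero_eq_empty (x : String) (h : PySem.Str.len x = 0) : x = "" := by
  have hl : x.toList.length = 0 := by
    have := PySem.Str.len_eq x; omega
  have hnil : x.toList = [] := List.eq_nil_of_length_eq_zero hl
  have := congrArg String.ofList hnil
  simpa using this

-- ===== VERDICT (by name: the statement is the Claim_ definition above) =====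
theorem get_largest_substring_spec : Claim_equal_get_largest_substring := by
  intro one two _
  unfold Spec_get_largest_substring get_largest_substring get_largest_substring_alt
  -- outer index loop -> foldl over `one`
  rw [PySem.List.len, PySem.List.len]
  rw [PySem.List.foldl_pyRange_zero_pyGetD' one ""
    (fun st x => (PySem.List.pyRange 0 (two.length : Int) 1).foldl (fun st j =>
      if x = PySem.List.pyGetD two j "" ∧ PySem.Str.len x > st.1 then
        (PySem.Str.len x, x) else st) st) ((0 : Int), "")]
  -- inner index loop -> foldl over `two`, then collapse it to a membership test
  have hinner : ∀ (st : Int × String) (x : String),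
      (PySem.List.pyRange 0 (two.length : Int) 1).foldl (fun st j =>
        if x = PySem.List.pyGetD two j "" ∧ PySem.Str.len x > st.1 then
          (PySem.Str.len x, x) else st) st
      = if x ∈ two ∧ PySem.Str.len x > st.1 then (PySem.Str.len x, x) else st := by
    intro st x
    rw [PySem.List.foldl_pyRange_zero_pyGetD' two ""
      (fun st y => if x = y ∧ PySem.Str.len x > st.1 then (PySem.Str.len x, x) else st) st]
    exact inner_loop_eq two x st
  simp only [hinner]
  -- split the condition and move the membership test into a filter
  have hsplit : (fun (st : Int × String) (x : String) =>
      if x ∈ two ∧ PySem.Str.len x > st.1 then (PySem.Str.len x, x) else st)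
      = (fun st x => if x ∈ two then
          (if PySem.Str.len x > st.1 then (PySem.Str.len x, x) else st) else st) := by
    funext st x
    by_cases hm : x ∈ two
    · rw [if_pos hm]
      by_cases hl : PySem.Str.len x > st.1
      · rw [if_pos ⟨hm, hl⟩, if_pos hl]
      · rw [if_neg (by rintro ⟨-, h⟩; exact hl h), if_neg hl]
    · rw [if_neg (by rintro ⟨h, -⟩; exact hm h), if_neg hm]
  rw [hsplit]
  rw [PySem.List.foldl_ite_eq_foldl_filter (fun x => x ∈ two)
    (fun st x => if PySem.Str.len x > st.1 then (PySem.Str.len x, x) else st) one ((0:Int), "")]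
  have hcont : (fun (x : String) => decide (x ∈ two)) = (fun x => two.contains x) := by
    funext x; simp
  rw [hcont]
  -- B's scan of the sorted list is the head of the sorted common list
  rw [find?_eq_head?_filter, filter_sorted_rev]
  -- both sides now speak about the same filtered list; case on it
  generalize one.filter (fun x => two.contains x) = l
  cases l with
  | nil => rfl
  | cons x t =>
    rw [head_sorted_rev_cons x t, List.foldl_cons]
    by_cases h : PySem.Str.len x > (0 : Int)
    · rw [if_pos (show PySem.Str.len x > ((0 : Int), "").1 from h)]
      exact fold_seeded_eq_pvBest t x
    · have hx0 : PySem.Str.len x = 0 := by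
        have := PySem.Str.len_eq x; omega
      have hx : x = "" := str_len_zero_eq_empty x hx0
      rw [if_neg (show ¬ PySem.Str.len x > ((0 : Int), "").1 from h)]
      have hseed : ((0 : Int), "") = (PySem.Str.len x, x) := by rw [hx]; rfl
      rw [hseed]
      exact fold_seeded_eq_pvBest t x
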